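-- pv_equiv track=rewrite | github.com/UltraGnome/AdventofCode2025 | day_06/solution.py | solution
-- ===== SOURCE A (Python) =====
-- import math
--
-- def solution(_matrix: list[list[str]]) -> int:
--     result = 0
--
--     column_index = 0  # To get the second column (index 1)
--
--     col_count = len(_matrix[0])
--
--     for c in range(column_index,col_count):
--         column = [row[c] for row in _matrix]
--         column.reverse()
--         sign = column[0]
--         int_list = [int(s) for s in column[1:]]
--         if sign == '+':
--             result += sum(int_list)
--         else:
--             result += math.prod(int_list)
--
--     return result
-- ===== SOURCE B (Python) =====
-- def solution(_matrix: list[list[str]]) -> int: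
--     col_count = len(_matrix[0])
--     sums = [0] * col_count
--     prods = [1] * col_count
--     for r in range(len(_matrix) - 1):
--         row = _matrix[r]
--         sums = [sums[c] + int(row[c]) for c in range(col_count)]
--         prods = [prods[c] * int(row[c]) for c in range(col_count)]
--     sign_row = _matrix[-1]
--     result = 0
--     for c in range(col_count):
--         result += sums[c] if sign_row[c] == '+' else prods[c]
--     return result
-- ===== Notes on version B (the rewrite author's own statement) =====
-- stated objective: alternative
-- what changed: B replaces A's column-at-a-time pass (build each column list, reverse it, then sum or multiply it) by a single row-major sweep that keeps running per-column sums and products and then combines them with the sign row.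
import Mathlib
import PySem

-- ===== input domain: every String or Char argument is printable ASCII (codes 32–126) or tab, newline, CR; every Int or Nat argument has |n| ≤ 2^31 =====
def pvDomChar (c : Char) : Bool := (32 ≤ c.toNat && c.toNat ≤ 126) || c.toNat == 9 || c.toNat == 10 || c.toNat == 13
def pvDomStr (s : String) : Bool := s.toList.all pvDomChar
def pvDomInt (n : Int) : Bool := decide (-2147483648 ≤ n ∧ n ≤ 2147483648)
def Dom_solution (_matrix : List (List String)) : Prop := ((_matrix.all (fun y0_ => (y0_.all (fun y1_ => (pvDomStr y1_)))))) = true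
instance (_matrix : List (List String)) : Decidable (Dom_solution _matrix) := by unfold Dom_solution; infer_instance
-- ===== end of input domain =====

-- B replaces A's per-column extraction (build each column, reverse it, sum/prod it)
-- by one row-major pass keeping running column sums and products; alternative decomposition, same O(rows·cols) cost.

-- ===== PORT A =====
def solution (_matrix : List (List String)) : Int :=
  let colCount : Int := ((PySem.List.pyGetD _matrix 0 []).length : Int)
  (PySem.List.pyRange 0 colCount 1).foldl (fun result c =>
    let column := _matrix.map (fun row => PySem.List.pyGetD row c "")
    let columnR := column.reverse
    let sign := PySem.List.pyGetD columnR 0 ""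
    let int_list := (PySem.List.slice columnR (some 1) none).map
      (fun s => (PySem.Int.ofStr? s).getD 0)
    if sign == "+" then result + int_list.sum else result + int_list.prod) 0

-- ===== PORT B =====
def solution_alt (_matrix : List (List String)) : Int :=
  let colCount : Int := ((PySem.List.pyGetD _matrix 0 []).length : Int)
  let sums : List Int := List.replicate colCount.toNat 0
  let prods : List Int := List.replicate colCount.toNat 1
  let sp := (PySem.List.pyRange 0 ((_matrix.length : Int) - 1) 1).foldl
    (fun (sp : List Int × List Int) r =>
      let row := PySem.List.pyGetD _matrix r []
      ((PySem.List.pyRange 0 colCount 1).map (fun c =>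
          PySem.List.pyGetD sp.1 c 0 + (PySem.Int.ofStr? (PySem.List.pyGetD row c "")).getD 0),
       (PySem.List.pyRange 0 colCount 1).map (fun c =>
          PySem.List.pyGetD sp.2 c 0 * (PySem.Int.ofStr? (PySem.List.pyGetD row c "")).getD 0)))
    (sums, prods)
  let signRow := PySem.List.pyGetD _matrix (-1) []
  (PySem.List.pyRange 0 colCount 1).foldl (fun result c =>
    result + (if PySem.List.pyGetD signRow c "" == "+" then PySem.List.pyGetD sp.1 c 0
              else PySem.List.pyGetD sp.2 c 0)) 0

-- ===== PRECONDITION & SPEC =====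
-- Pre_ excludes exactly the inputs where Python A raises: the empty matrix (IndexError on
-- _matrix[0]), rows shorter than the first row (IndexError on row[c]), and non-last-row
-- entries that int() cannot parse (ValueError).
def Pre_solution (_matrix : List (List String)) : Prop :=
  _matrix ≠ [] ∧
  (∀ row ∈ _matrix, (_matrix.headD []).length ≤ row.length) ∧
  (∀ row ∈ _matrix.dropLast, ∀ s ∈ row.take (_matrix.headD []).length,
    (PySem.Int.ofStr? s).isSome = true)
instance (_matrix : List (List String)) : Decidable (Pre_solution _matrix) := by
  unfold Pre_solution; infer_instance

def pvWitness_solution : List (List String) := [["1", "2"], ["3", "4"], ["+", "*"]]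

def Spec_solution (_matrix : List (List String)) (out : Int) : Prop := out = solution_alt _matrix
instance (_matrix : List (List String)) (out : Int) : Decidable (Spec_solution _matrix out) := by
  unfold Spec_solution; infer_instance

-- ===== CLAIM (what is proved, stated in full; the proofs are below) =====
def Claim_equal_solution : Prop := ∀ (_matrix : List (List String)), Dom_solution _matrix → Pre_solution _matrix → Spec_solution _matrix (solution _matrix)

-- ===== LEMMAS AND PROOFS =====

-- the integer value of entry c of a row (0 if missing or unparsable; Pre_ rules those out)
def pvF (row : List String) (c : Int) : Int :=
  (PySem.Int.ofStr? (PySem.List.pyGetD row c "")).getD 0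

-- invariant of B's row loop: the two accumulator lists stay pointwise images of the column range
theorem pv_rowloop (m : List (List String)) (w : Int) (rs : List Int) (f g : Int → Int) :
    rs.foldl (fun (sp : List Int × List Int) r =>
      ((PySem.List.pyRange 0 w 1).map (fun c =>
          PySem.List.pyGetD sp.1 c 0 +
            (PySem.Int.ofStr? (PySem.List.pyGetD (PySem.List.pyGetD m r []) c "")).getD 0),
       (PySem.List.pyRange 0 w 1).map (fun c =>
          PySem.List.pyGetD sp.2 c 0 *
            (PySem.Int.ofStr? (PySem.List.pyGetD (PySem.List.pyGetD m r []) c "")).getD 0)))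
      ((PySem.List.pyRange 0 w 1).map f, (PySem.List.pyRange 0 w 1).map g)
    = ((PySem.List.pyRange 0 w 1).map
         (fun c => f c + (rs.map (fun r => pvF (PySem.List.pyGetD m r []) c)).sum),
       (PySem.List.pyRange 0 w 1).map
         (fun c => g c * (rs.map (fun r => pvF (PySem.List.pyGetD m r []) c)).prod)) := by
  induction rs generalizing f g with
  | nil => simp
  | cons r rs ih =>
    simp only [List.foldl_cons]
    have hs : (PySem.List.pyRange 0 w 1).map (fun c =>
        PySem.List.pyGetD ((PySem.List.pyRange 0 w 1).map f) c 0 +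
          (PySem.Int.ofStr? (PySem.List.pyGetD (PySem.List.pyGetD m r []) c "")).getD 0)
        = (PySem.List.pyRange 0 w 1).map (fun c => f c + pvF (PySem.List.pyGetD m r []) c) := by
      refine List.map_congr_left (fun c hc => ?_)
      obtain ⟨h0, hw⟩ := (PySem.List.mem_pyRange_one).1 hc
      rw [PySem.List.pyGetD_map_pyRange_of_nonneg f w c 0 h0 hw]; rfl
    have hp : (PySem.List.pyRange 0 w 1).map (fun c =>
        PySem.List.pyGetD ((PySem.List.pyRange 0 w 1).map g) c 0 *
          (PySem.Int.ofStr? (PySem.List.pyGetD (PySem.List.pyGetD m r []) c "")).getD 0)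
        = (PySem.List.pyRange 0 w 1).map (fun c => g c * pvF (PySem.List.pyGetD m r []) c) := by
      refine List.map_congr_left (fun c hc => ?_)
      obtain ⟨h0, hw⟩ := (PySem.List.mem_pyRange_one).1 hc
      rw [PySem.List.pyGetD_map_pyRange_of_nonneg g w c 0 h0 hw]; rfl
    simp only [hs, hp]
    rw [ih (fun c => f c + pvF (PySem.List.pyGetD m r []) c)
          (fun c => g c * pvF (PySem.List.pyGetD m r []) c)]
    simp only [Prod.mk.injEq]
    constructor <;> (refine List.map_congr_left (fun c hc => ?_) ; simp [add_assoc, mul_assoc])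

-- the row indices 0..len-2 fetch exactly the rows except the last
theorem pv_rows_eq_dropLast (m : List (List String)) (hm : m ≠ []) :
    (PySem.List.pyRange 0 ((m.length : Int) - 1) 1).map (fun r => PySem.List.pyGetD m r [])
      = m.dropLast := by
  have hlen : ((m.length : Int) - 1) = ((m.dropLast.length : Int)) := by
    have : 1 ≤ m.length := List.length_pos_iff.2 hm
    simp [List.length_dropLast]; omega
  rw [hlen]
  have hcongr : (PySem.List.pyRange 0 ((m.dropLast.length : Int)) 1).map
      (fun r => PySem.List.pyGetD m r [])
      = (PySem.List.pyRange 0 ((m.dropLast.length : Int)) 1).map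
      (fun r => PySem.List.pyGetD m.dropLast r []) := by
    refine List.map_congr_left (fun r hr => ?_)
    obtain ⟨h0, hw⟩ := (PySem.List.mem_pyRange_one).1 hr
    have hrn : r.toNat < m.dropLast.length := by omega
    have hrm : r.toNat < m.length := by
      have hd : m.dropLast.length = m.length - 1 := List.length_dropLast
      omega
    rw [PySem.List.pyGetD_eq_getElem m [] h0 (by omega),
        PySem.List.pyGetD_eq_getElem m.dropLast [] h0 (by omega)]
    exact (List.getElem_dropLast hrn).symm
  rw [hcongr, PySem.List.map_pyGetD_pyRange_zero']

-- common target: per-column "sum if '+', else product", summed over the columns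
def pvG (l : List (List String)) (a : List String) (c : Int) : Int :=
  if PySem.List.pyGetD a c "" == "+" then (l.map (fun row => pvF row c)).sum
  else (l.map (fun row => pvF row c)).prod

theorem pv_A_eq (l : List (List String)) (a : List String) :
    solution (l ++ [a]) =
      ((PySem.List.pyRange 0 ((PySem.List.pyGetD (l ++ [a]) 0 []).length : Int) 1).map
        (pvG l a)).sum := by
  unfold solution
  dsimp only
  rw [PySem.List.foldl_congr_mem' _ _
      (fun result c => result + pvG l a c) 0 ?hbody,
    PySem.List.foldl_add, zero_add]
  case hbody =>
    intro c hc result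
    have hcol : ((l ++ [a]).map (fun row => PySem.List.pyGetD row c "")).reverse
        = PySem.List.pyGetD a c "" ::
          (l.map (fun row => PySem.List.pyGetD row c "")).reverse := by
      simp
    rw [hcol, PySem.List.pyGetD_zero_cons, PySem.List.slice_from_one, List.tail_cons]
    unfold pvG pvF
    by_cases h : PySem.List.pyGetD a c "" = "+" <;>
      simp [h, List.map_reverse, List.sum_reverse, List.prod_reverse, List.map_map,
        Function.comp_def]

theorem pv_B_eq (l : List (List String)) (a : List String) :
    solution_alt (l ++ [a]) =
      ((PySem.List.pyRange 0 ((PySem.List.pyGetD (l ++ [a]) 0 []).length : Int) 1).map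
        (pvG l a)).sum := by
  unfold solution_alt
  dsimp only
  rw [show (List.replicate ((PySem.List.pyGetD (l ++ [a]) 0 []).length : Int).toNat (0 : Int))
        = (PySem.List.pyRange 0 ((PySem.List.pyGetD (l ++ [a]) 0 []).length : Int) 1).map
            (Function.const Int (0 : Int)) by
      rw [List.map_const, PySem.List.length_pyRange_one]; simp,
    show (List.replicate ((PySem.List.pyGetD (l ++ [a]) 0 []).length : Int).toNat (1 : Int))
        = (PySem.List.pyRange 0 ((PySem.List.pyGetD (l ++ [a]) 0 []).length : Int) 1).map
            (Function.const Int (1 : Int)) by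
      rw [List.map_const, PySem.List.length_pyRange_one]; simp,
    pv_rowloop]
  rw [PySem.List.foldl_congr_mem' _ _
      (fun result c => result + pvG l a c) 0 ?hbody,
    PySem.List.foldl_add, zero_add]
  case hbody =>
    intro c hc result
    obtain ⟨h0, hw⟩ := (PySem.List.mem_pyRange_one).1 hc
    rw [PySem.List.pyGetD_map_pyRange_of_nonneg _ _ c 0 h0 hw,
      PySem.List.pyGetD_map_pyRange_of_nonneg _ _ c 0 h0 hw,
      PySem.List.pyGetD_neg_one_append_singleton]
    have hrows : (PySem.List.pyRange 0 (((l ++ [a]).length : Int) - 1) 1).map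
        (fun r => pvF (PySem.List.pyGetD (l ++ [a]) r []) c)
        = l.map (fun row => pvF row c) := by
      have h := congrArg (List.map (fun row => pvF row c))
        (pv_rows_eq_dropLast (l ++ [a]) (by simp))
      simpa [List.map_map, Function.comp] using h
    rw [hrows]
    unfold pvG
    simp

theorem solution_eq_alt (m : List (List String)) (hm : m ≠ []) :
    solution m = solution_alt m := by
  rcases List.eq_nil_or_concat m with h | ⟨l, a, rfl⟩
  · exact absurd h hm
  · rw [List.concat_eq_append, pv_A_eq, pv_B_eq]

-- ===== VERDICT (by name: the statement is the Claim_ definition above) =====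
theorem solution_spec : Claim_equal_solution := by
  intro m _ hpre
  unfold Spec_solution
  exact solution_eq_alt m hpre.1
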